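-- pv_equiv track=rewrite | github.com/rmohl/Knot | assets/bracelet-algo.py | findBiggestRowLessThanN
-- ===== SOURCE A (Python) =====
-- def findBiggestRowLessThanN(pixelArt, colour, n):
--     val = 0
--     rows = []
--
--     # finding max value
--     for row in pixelArt:
--         count = row.count(colour)
--         if count > val:
--             val = count
--
--     # finding rows with max value
--     for i in range(len(pixelArt)):
--         count = pixelArt[i].count(colour)
--         if count == val:
--             rows.append(i)
--
--     return rows
-- ===== SOURCE B (Python) =====
-- def findBiggestRowLessThanN(pixelArt, colour, n):
--     # Single pass: maintain the best count seen so far and the rows achieving it;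
--     # a strictly larger count resets the row list, an equal count extends it.
--     val = 0
--     rows = []
--     for i, row in enumerate(pixelArt):
--         c = row.count(colour)
--         if c > val:
--             val = c
--             rows = [i]
--         elif c == val:
--             rows.append(i)
--     return rows
-- ===== Notes on version B (the rewrite author's own statement) =====
-- stated objective: alternative
-- what changed: A makes two staged passes (one loop to find the maximum per-row count, a second loop re-counting every row to collect matching indices); B is a single pass with an argmax accumulator that resets the collected row list whenever a strictly larger count appears and appends on ties, counting each row exactly once.
import Mathlib
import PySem

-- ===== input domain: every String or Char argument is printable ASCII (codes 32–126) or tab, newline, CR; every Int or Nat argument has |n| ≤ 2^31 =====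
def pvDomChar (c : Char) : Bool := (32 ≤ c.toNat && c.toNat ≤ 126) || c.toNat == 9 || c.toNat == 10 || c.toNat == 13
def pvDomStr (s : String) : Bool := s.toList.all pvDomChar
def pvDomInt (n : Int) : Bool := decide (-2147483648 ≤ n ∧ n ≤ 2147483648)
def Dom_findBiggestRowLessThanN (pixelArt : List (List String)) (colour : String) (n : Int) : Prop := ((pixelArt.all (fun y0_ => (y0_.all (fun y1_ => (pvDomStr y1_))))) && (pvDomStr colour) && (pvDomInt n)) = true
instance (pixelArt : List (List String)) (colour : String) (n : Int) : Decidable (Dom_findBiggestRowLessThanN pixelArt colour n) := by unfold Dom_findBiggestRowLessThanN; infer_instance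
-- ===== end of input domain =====

-- B replaces A's two staged passes by one single-pass argmax accumulator that resets the
-- collected row list on a strictly larger count and appends on ties (objective: alternative).

-- ===== PORT A =====
def findBiggestRowLessThanN (pixelArt : List (List String)) (colour : String) (n : Int) : List Int :=
  -- val = 0; for row in pixelArt: count = row.count(colour); if count > val: val = count
  let val : Int := pixelArt.foldl (fun val row =>
    let count : Int := PySem.List.count row colour
    if count > val then count else val) 0
  -- rows = []; for i in range(len(pixelArt)): count = pixelArt[i].count(colour); if count == val: rows.append(i)
  let rows : List Int := (PySem.List.pyRange 0 (PySem.List.len pixelArt) 1).foldl (fun rows i =>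
    let count : Int := PySem.List.count (PySem.List.pyGetD pixelArt i []) colour
    if count == val then rows ++ [i] else rows) []
  rows

-- ===== PORT B =====
def findBiggestRowLessThanN_alt (pixelArt : List (List String)) (colour : String) (n : Int) : List Int :=
  -- val = 0; rows = []
  -- for i, row in enumerate(pixelArt): c = row.count(colour);
  --   if c > val: val = c; rows = [i]
  --   elif c == val: rows.append(i)
  let st : Int × List Int := (PySem.List.enumerate pixelArt 0).foldl (fun s p =>
    if (PySem.List.count p.2 colour : Int) > s.1 then ((PySem.List.count p.2 colour : Int), [p.1])
    else if (PySem.List.count p.2 colour : Int) == s.1 then (s.1, s.2 ++ [p.1])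
    else s) (0, [])
  st.2

-- ===== PRECONDITION & SPEC =====
def Spec_findBiggestRowLessThanN (pixelArt : List (List String)) (colour : String) (n : Int) (out : List Int) : Prop := out = findBiggestRowLessThanN_alt pixelArt colour n
instance (pixelArt : List (List String)) (colour : String) (n : Int) (out : List Int) : Decidable (Spec_findBiggestRowLessThanN pixelArt colour n out) := by unfold Spec_findBiggestRowLessThanN; infer_instance

-- ===== CLAIM (what is proved, stated in full; the proofs are below) =====
def Claim_equal_findBiggestRowLessThanN : Prop := ∀ (pixelArt : List (List String)) (colour : String) (n : Int), Dom_findBiggestRowLessThanN pixelArt colour n → Spec_findBiggestRowLessThanN pixelArt colour n (findBiggestRowLessThanN pixelArt colour n)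

-- ===== LEMMAS AND PROOFS =====

-- the seed of a foldl max is a lower bound of the result
theorem le_foldl_max (l : List Int) (a : Int) : a ≤ l.foldl max a := by
  induction l generalizing a with
  | nil => simp
  | cons c t ih => exact le_trans (le_max_left a c) (ih (max a c))

-- A's running-max loop over Int is a foldl max.
theorem runmax_eq_foldl_max (l : List Int) (a : Int) :
    l.foldl (fun v c => if c > v then c else v) a = l.foldl max a := by
  have : (fun (v c : Int) => if c > v then c else v) = fun v c => max v c := by
    funext v c; simp [max_def]; omega
  rw [this]

-- characterization of B's single-pass fold (for any scoring function f): the first component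
-- is the running max, the second is (old rows if the max did not grow, else nothing) ++ all
-- indices hitting the max.
theorem bfold_eq {α : Type} (f : α → Int) (l : List α) (k v : Int) (rs : List Int) :
    (PySem.List.enumerate l k).foldl (fun (s : Int × List Int) p =>
        if f p.2 > s.1 then (f p.2, [p.1])
        else if f p.2 == s.1 then (s.1, s.2 ++ [p.1])
        else s) (v, rs)
      = ((l.map f).foldl max v,
         (if (l.map f).foldl max v == v then rs else []) ++
           ((PySem.List.enumerate l k).filter (fun p => f p.2 == (l.map f).foldl max v)).map (·.1)) := by
  induction l generalizing k v rs with
  | nil => simp [PySem.List.enumerate_nil]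
  | cons a t ih =>
      rw [PySem.List.enumerate_cons, List.map_cons, List.foldl_cons, List.foldl_cons,
          List.filter_cons]
      simp only [gt_iff_lt]
      by_cases h1 : v < f a
      · rw [if_pos h1, max_eq_right h1.le, ih (k+1) (f a) [k]]
        have hle := le_foldl_max (t.map f) (f a)
        have hVv : ((t.map f).foldl max (f a) == v) = false := by
          rw [beq_eq_false_iff_ne]; omega
        rw [hVv]
        by_cases h2 : f a = (t.map f).foldl max (f a)
        · have h3 : ((t.map f).foldl max (f a) == f a) = true := by rw [beq_iff_eq]; omega
          have h4 : (f a == (t.map f).foldl max (f a)) = true := by rw [beq_iff_eq]; omega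
          simp [h3, h4]
        · have h3 : ((t.map f).foldl max (f a) == f a) = false := by rw [beq_eq_false_iff_ne]; omega
          have h4 : (f a == (t.map f).foldl max (f a)) = false := by rw [beq_eq_false_iff_ne]; omega
          simp [h3, h4]
      · rw [if_neg h1, max_eq_left (not_lt.mp h1)]
        have hfa : f a ≤ v := not_lt.mp h1
        have hle := le_foldl_max (t.map f) v
        by_cases h2 : f a = v
        · have hbe : (f a == v) = true := by rw [beq_iff_eq]; exact h2
          rw [hbe, if_pos rfl, ih (k+1) v (rs ++ [k])]
          by_cases h3 : (t.map f).foldl max v = v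
          · have hb3 : ((t.map f).foldl max v == v) = true := by rw [beq_iff_eq]; exact h3
            have h4 : (f a == (t.map f).foldl max v) = true := by rw [beq_iff_eq]; omega
            simp [hb3, h4]
          · have hb3 : ((t.map f).foldl max v == v) = false := by rw [beq_eq_false_iff_ne]; exact h3
            have h4 : (f a == (t.map f).foldl max v) = false := by rw [beq_eq_false_iff_ne]; omega
            simp [hb3, h4]
        · have hbe : (f a == v) = false := by rw [beq_eq_false_iff_ne]; exact h2
          rw [hbe, if_neg (by simp), ih (k+1) v rs]
          have h4 : (f a == (t.map f).foldl max v) = false := by rw [beq_eq_false_iff_ne]; omega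
          simp [h4]

-- ===== VERDICT (by name: the statement is the Claim_ definition above) =====
theorem findBiggestRowLessThanN_spec : Claim_equal_findBiggestRowLessThanN := by
  intro pixelArt colour n _
  show _ = _
  unfold findBiggestRowLessThanN findBiggestRowLessThanN_alt
  simp only []
  rw [bfold_eq (fun r => (PySem.List.count r colour : Int)) pixelArt 0 0 []]
  simp only []
  have hval : pixelArt.foldl (fun val row =>
      if (PySem.List.count row colour : Int) > val then (PySem.List.count row colour : Int) else val) 0
      = (pixelArt.map (fun r => (PySem.List.count r colour : Int))).foldl max 0 := by
    rw [← runmax_eq_foldl_max, List.foldl_map]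
  set V : Int := (pixelArt.map (fun r => (PySem.List.count r colour : Int))).foldl max 0 with hV
  rw [hval]
  rw [PySem.List.enumerate_eq_map_pyRange pixelArt ([] : List String)]
  rw [List.filter_map, List.map_map]
  have hfold := PySem.List.foldl_append_if
      (fun i => (PySem.List.count (PySem.List.pyGetD pixelArt i []) colour : Int) == V)
      (fun i : Int => i)
      (PySem.List.pyRange 0 (PySem.List.len pixelArt) 1) []
  simp only [List.nil_append, List.map_id'] at hfold
  rw [hfold]
  simp only [Function.comp_def, List.map_id']
  cases h : (V == (0 : Int)) <;> simp
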